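-- pv_equiv track=rewrite | github.com/lpoto/discord-utility-bot | bot/utils/embed_wrapper.py | expand_text
-- ===== SOURCE A (Python) =====
-- def expand_text(text, version):
--     spacer = '\u2000\u2000'
--     if len(text) <= 57:
--         spacer = (59 - len(text) - len(version)) * '\u2000'
--     for i in range(1, len(text) // 10 + 1):
--         spacer += i * ' \u2000'
--     for i in range(1, len(version) // 10 + 1):
--         spacer += i * ' \u2000'
--     return text + spacer + version
-- ===== SOURCE B (Python) =====
-- def expand_text(text, version):
--     # closed-form spacer: the two 1..n//10 accumulation loops collapse to triangular-number repeats
--     if len(text) <= 57: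
--         spacer = (59 - len(text) - len(version)) * '\u2000'
--     else:
--         spacer = '\u2000\u2000'
--     m = len(text) // 10
--     k = len(version) // 10
--     spacer += ' \u2000' * ((m * (m + 1) + k * (k + 1)) // 2)
--     return text + spacer + version
-- ===== Notes on version B (the rewrite author's own statement) =====
-- stated objective: simpler
-- what changed: Replaces the two accumulation loops (appending i copies of the unit string for i=1..len//10) with a single closed-form string multiplication by the triangular numbers m(m+1)/2 + k(k+1)/2.
import Mathlib
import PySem

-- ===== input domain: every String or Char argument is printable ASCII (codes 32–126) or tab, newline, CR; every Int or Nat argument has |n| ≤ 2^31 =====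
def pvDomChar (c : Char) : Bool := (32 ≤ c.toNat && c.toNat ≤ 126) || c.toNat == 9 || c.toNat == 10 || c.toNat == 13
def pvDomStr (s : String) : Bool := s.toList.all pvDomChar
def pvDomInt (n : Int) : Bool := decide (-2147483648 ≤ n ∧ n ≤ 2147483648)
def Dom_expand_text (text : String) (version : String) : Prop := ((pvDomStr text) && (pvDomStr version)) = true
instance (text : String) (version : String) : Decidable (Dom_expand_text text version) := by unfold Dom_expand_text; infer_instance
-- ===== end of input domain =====

-- B replaces A's two spacer-accumulation loops with one closed-form triangular-number repeat (simpler; same return value).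

-- ===== PORT A =====
def expand_text (text : String) (version : String) : String :=
  let t := text.toList
  let v := version.toList
  let spacer : List Char :=
    if PySem.Chars.len t ≤ 57 then
      PySem.List.pyRepeat ['\u2000'] (59 - PySem.Chars.len t - PySem.Chars.len v)
    else ['\u2000', '\u2000']
  let spacer :=
    (PySem.List.pyRange 1 (PySem.Int.floordiv (PySem.Chars.len t) 10 + 1) 1).foldl
      (fun acc i => acc ++ PySem.List.pyRepeat [' ', '\u2000'] i) spacer
  let spacer :=
    (PySem.List.pyRange 1 (PySem.Int.floordiv (PySem.Chars.len v) 10 + 1) 1).foldl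
      (fun acc i => acc ++ PySem.List.pyRepeat [' ', '\u2000'] i) spacer
  String.ofList (t ++ spacer ++ v)

-- ===== PORT B =====
def expand_text_alt (text : String) (version : String) : String :=
  let t := text.toList
  let v := version.toList
  let base : List Char :=
    if t.length ≤ 57 then
      List.replicate ((59 - (t.length : Int) - (v.length : Int)).toNat) '\u2000'
    else ['\u2000', '\u2000']
  let m := t.length / 10
  let k := v.length / 10
  let spacer := base ++ (List.replicate ((m * (m + 1) + k * (k + 1)) / 2) ([' ', '\u2000'] : List Char)).flatten
  String.ofList (t ++ spacer ++ v)

-- ===== PRECONDITION & SPEC =====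
def Spec_expand_text (text : String) (version : String) (out : String) : Prop := out = expand_text_alt text version
instance (text : String) (version : String) (out : String) : Decidable (Spec_expand_text text version out) := by unfold Spec_expand_text; infer_instance

-- ===== CLAIM (what is proved, stated in full; the proofs are below) =====
def Claim_equal_expand_text : Prop := ∀ (text : String) (version : String), Dom_expand_text text version → Spec_expand_text text version (expand_text text version)

-- ===== LEMMAS AND PROOFS =====

theorem pv_floordiv_ten (n : Nat) : PySem.Int.floordiv (n : Int) 10 = ((n / 10 : Nat) : Int) := by
  rw [PySem.Int.floordiv, Int.fdiv_eq_ediv_of_nonneg (n : Int) (by positivity)]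
  omega

theorem pv_tri_fold (u : List Char) (m : Nat) (acc : List Char) :
    (PySem.List.pyRange 1 ((m : Int) + 1) 1).foldl
      (fun acc i => acc ++ PySem.List.pyRepeat u i) acc
    = acc ++ (List.replicate (m * (m + 1) / 2) u).flatten := by
  induction m with
  | zero => simp [PySem.List.pyRange]
  | succ n ih =>
    have hsplit : PySem.List.pyRange 1 ((↑(n + 1) : Int) + 1) 1
        = PySem.List.pyRange 1 ((n : Int) + 1) 1 ++ PySem.List.pyRange ((n : Int) + 1) ((↑(n + 1) : Int) + 1) 1 := by
      exact PySem.List.pyRange_one_append 1 ((n : Int) + 1) ((↑(n + 1) : Int) + 1) (by omega) (by push_cast; omega)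
    have hsing : PySem.List.pyRange ((n : Int) + 1) ((↑(n + 1) : Int) + 1) 1 = [(n : Int) + 1] := by
      have h1 : PySem.List.pyRange ((n : Int) + 1) ((↑(n + 1) : Int) + 1) 1
          = ((n : Int) + 1) :: PySem.List.pyRange ((n : Int) + 1 + 1) ((↑(n + 1) : Int) + 1) 1 :=
        PySem.List.pyRange_one_cons (by push_cast; omega)
      have h2 : (PySem.List.pyRange ((n : Int) + 1 + 1) ((↑(n + 1) : Int) + 1) 1).length = 0 := by
        rw [PySem.List.length_pyRange_one]; push_cast; omega
      rw [h1, List.length_eq_zero_iff.mp h2]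
    rw [hsplit, List.foldl_append, ih, hsing]
    have htn : ((n : Int) + 1).toNat = n + 1 := by omega
    have hrep : PySem.List.pyRepeat u ((n : Int) + 1) = (List.replicate (n + 1) u).flatten := by
      rw [PySem.List.pyRepeat, htn]
    simp only [List.foldl_cons, List.foldl_nil, hrep, List.append_assoc]
    rw [← List.flatten_append, ← List.replicate_add]
    have hd : 2 ∣ n * (n + 1) := (Nat.even_mul_succ_self n).two_dvd
    have hr : (n + 1) * (n + 1 + 1) = n * (n + 1) + 2 * (n + 1) := by ring
    congr 3
    omega

theorem pv_tri_add (a b : Nat) : a * (a + 1) / 2 + b * (b + 1) / 2 = (a * (a + 1) + b * (b + 1)) / 2 := by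
  have ha : 2 ∣ a * (a + 1) := (Nat.even_mul_succ_self a).two_dvd
  have hb : 2 ∣ b * (b + 1) := (Nat.even_mul_succ_self b).two_dvd
  omega

theorem expand_text_eq_alt (text version : String) : expand_text text version = expand_text_alt text version := by
  unfold expand_text expand_text_alt
  simp only [PySem.Chars.len_eq, PySem.List.pyRepeat_singleton]
  rw [pv_floordiv_ten, pv_floordiv_ten]
  rw [pv_tri_fold, pv_tri_fold]
  have hif : (if (text.toList.length : Int) ≤ 57 then
        List.replicate ((59 - (text.toList.length : Int) - (version.toList.length : Int)).toNat) '\u2000'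
      else ['\u2000', '\u2000'])
      = (if text.toList.length ≤ 57 then
        List.replicate ((59 - (text.toList.length : Int) - (version.toList.length : Int)).toNat) '\u2000'
      else ['\u2000', '\u2000']) := by
    by_cases h : text.toList.length ≤ 57
    · rw [if_pos (by exact_mod_cast h), if_pos h]
    · rw [if_neg (by exact_mod_cast h), if_neg h]
  rw [hif]
  simp only [List.append_assoc]
  have hsp : (List.replicate (text.toList.length / 10 * (text.toList.length / 10 + 1) / 2) ([' ', '\u2000'] : List Char)).flatten ++
        ((List.replicate (version.toList.length / 10 * (version.toList.length / 10 + 1) / 2) ([' ', '\u2000'] : List Char)).flatten ++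
          version.toList)
      = (List.replicate ((text.toList.length / 10 * (text.toList.length / 10 + 1) +
            version.toList.length / 10 * (version.toList.length / 10 + 1)) / 2) ([' ', '\u2000'] : List Char)).flatten ++
          version.toList := by
    rw [← List.append_assoc, ← List.flatten_append, ← List.replicate_add,
      pv_tri_add (text.toList.length / 10) (version.toList.length / 10)]
  rw [hsp]

-- ===== VERDICT (by name: the statement is the Claim_ definition above) =====
theorem expand_text_spec : Claim_equal_expand_text := by
  intro text version _
  unfold Spec_expand_text
  exact expand_text_eq_alt text version
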